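-- pv_equiv track=rewrite | github.com/Qenszu/workshop | python/WDI/zestaw_2/zad_74.py | func
-- ===== SOURCE A (Python) =====
-- def IsPrime(n):
--     i = 3
--     if n%2 == 0 and n != 2:
--         return False
--     while i**i <=n:
--         if n%i == 0:
--             return False
--         i += 1
--
--     return True
--
-- def func(tab):
--     size = len(tab)
--     i = 0
--     j = 1
--     pom = False
--
--     for a in range(size):
--         if a == i and IsPrime(tab[i]):
--             return False
--         elif IsPrime(tab[a]):
--             pom = True
--         i, j = j, i + j
--
--     if pom:
--         return True
--     else:
--         return False
-- ===== SOURCE B (Python) =====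
-- def IsPrime(n):
--     i = 3
--     if n%2 == 0 and n != 2:
--         return False
--     while i**i <=n:
--         if n%i == 0:
--             return False
--         i += 1
--
--     return True
--
-- def func(tab):
--     size = len(tab)
--     # precompute the "special" indices: positions a whose running Fibonacci
--     # state i equals a (the fixed points of the recurrence within range(size))
--     special = []
--     i, j = 0, 1
--     for a in range(size):
--         if a == i:
--             special.append(a)
--         i, j = j, i + j
--     if any(IsPrime(tab[a]) for a in special):
--         return False
--     return any(IsPrime(tab[a]) for a in range(size) if a not in special)
-- ===== Notes on version B (the rewrite author's own statement) =====
-- stated objective: alternative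
-- what changed: B first precomputes the list of 'special' indices (positions a where the running Fibonacci state i equals a) with the same recurrence, then decides the result by two separate any-passes (special indices, then the non-special rest), instead of A's single interleaved loop with an early return and a pom flag.
import Mathlib
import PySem

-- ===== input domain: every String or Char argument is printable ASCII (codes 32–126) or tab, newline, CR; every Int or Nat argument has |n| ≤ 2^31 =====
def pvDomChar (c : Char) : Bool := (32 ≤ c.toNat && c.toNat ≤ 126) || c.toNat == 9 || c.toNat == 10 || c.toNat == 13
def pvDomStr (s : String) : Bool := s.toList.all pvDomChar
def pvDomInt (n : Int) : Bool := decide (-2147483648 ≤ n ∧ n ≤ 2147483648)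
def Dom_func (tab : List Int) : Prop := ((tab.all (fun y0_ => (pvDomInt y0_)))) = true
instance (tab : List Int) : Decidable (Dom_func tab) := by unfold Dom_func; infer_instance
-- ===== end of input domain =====

-- B precomputes the Fibonacci-fixed-point index set first and then makes two
-- membership-filtered passes, instead of A's interleaved single pass (objective: alternative decomposition).

-- ===== PORT A =====
-- shared helper IsPrime (byte-identical in Source A and Source B); the `3 ≤ i` argument is
-- only a termination aid (i starts at 3 and increases)
def isPrimeLoop (n i : Int) (hi : 3 ≤ i) : Bool :=
  if h : i ^ i.toNat ≤ n then
    if PySem.Int.mod n i = 0 then false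
    else isPrimeLoop n (i + 1) (by omega)
  else true
termination_by (n + 1 - i).toNat
decreasing_by
  have h1 : i ≤ i ^ i.toNat := by
    calc i = i ^ 1 := (pow_one i).symm
      _ ≤ i ^ i.toNat := pow_le_pow_right₀ (by omega) (by omega)
  omega

def IsPrime (n : Int) : Bool :=
  if PySem.Int.mod n 2 = 0 ∧ n ≠ 2 then false
  else isPrimeLoop n 3 (by norm_num)

-- the for-loop of A over `a in range(size)` with state (i, j, pom) and early return;
-- tab[i] / tab[a] are in range on every executed path (a < size, and i = a on the branch reading tab[i])
def funcGo (tab : List Int) (as_ : List Int) (i j : Int) (pom : Bool) : Bool :=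
  match as_ with
  | [] => if pom then true else false
  | a :: rest =>
    if a = i ∧ IsPrime ((PySem.List.pyGet? tab i).getD 0) then false
    else if IsPrime ((PySem.List.pyGet? tab a).getD 0) then funcGo tab rest j (i + j) true
    else funcGo tab rest j (i + j) pom

def func (tab : List Int) : Bool :=
  funcGo tab (PySem.List.pyRange 0 tab.length 1) 0 1 false

-- ===== PORT B =====
-- B's first loop: collect the indices a with a == i (append-accumulator, as in Source B)
def specGo (as_ : List Int) (i j : Int) (acc : List Int) : List Int :=
  match as_ with
  | [] => acc
  | a :: rest =>
    if a = i then specGo rest j (i + j) (acc ++ [a])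
    else specGo rest j (i + j) acc

def func_alt (tab : List Int) : Bool :=
  let size : Int := tab.length
  let special := specGo (PySem.List.pyRange 0 size 1) 0 1 []
  if special.any (fun a => IsPrime ((PySem.List.pyGet? tab a).getD 0)) then false
  else ((PySem.List.pyRange 0 size 1).filter
          (fun a => !(special.contains a))).any
        (fun a => IsPrime ((PySem.List.pyGet? tab a).getD 0))

-- ===== PRECONDITION & SPEC =====
def Spec_func (tab : List Int) (out : Bool) : Prop := out = func_alt tab
instance (tab : List Int) (out : Bool) : Decidable (Spec_func tab out) := by unfold Spec_func; infer_instance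

-- ===== CLAIM (what is proved, stated in full; the proofs are below) =====
def Claim_equal_func : Prop := ∀ (tab : List Int), Dom_func tab → Spec_func tab (func tab)

-- ===== LEMMAS AND PROOFS =====

-- cons-form of B's special-index loop
def spec (as_ : List Int) (i j : Int) : List Int :=
  match as_ with
  | [] => []
  | a :: rest =>
    if a = i then a :: spec rest j (i + j)
    else spec rest j (i + j)

theorem specGo_eq (as_ : List Int) (i j : Int) (acc : List Int) :
    specGo as_ i j acc = acc ++ spec as_ i j := by
  induction as_ generalizing i j acc with
  | nil => simp [specGo, spec]
  | cons a rest ih =>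
    simp only [specGo, spec]
    split_ifs with h
    · rw [ih]; simp
    · rw [ih]

theorem spec_subset (as_ : List Int) (i j : Int) :
    ∀ x ∈ spec as_ i j, x ∈ as_ := by
  induction as_ generalizing i j with
  | nil => simp [spec]
  | cons a rest ih =>
    intro x hx
    simp only [spec] at hx
    split_ifs at hx with h
    · rcases List.mem_cons.mp hx with rfl | hx
      · simp
      · exact List.mem_cons_of_mem _ (ih _ _ _ hx)
    · exact List.mem_cons_of_mem _ (ih _ _ _ hx)

-- main invariant: A's interleaved loop equals "special prime? → False, else pom ∨ non-special prime"
theorem funcGo_eq (tab : List Int) (as_ : List Int) (i j : Int) (pom : Bool)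
    (hnd : as_.Nodup) :
    funcGo tab as_ i j pom =
      (if (spec as_ i j).any (fun a => IsPrime ((PySem.List.pyGet? tab a).getD 0)) then false
       else (pom || (as_.filter (fun a => !((spec as_ i j).contains a))).any
               (fun a => IsPrime ((PySem.List.pyGet? tab a).getD 0)))) := by
  induction as_ generalizing i j pom with
  | nil => cases pom <;> simp [funcGo, spec]
  | cons a rest ih =>
    have hnd' : rest.Nodup := hnd.of_cons
    have hna : a ∉ rest := (List.nodup_cons.mp hnd).1
    by_cases heq : a = i
    · subst heq
      simp only [spec, if_true]
      by_cases hp : IsPrime ((PySem.List.pyGet? tab a).getD 0) = true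
      · simp only [funcGo]
        rw [if_pos ⟨trivial, hp⟩]
        simp [List.any_cons, hp]
      · simp only [funcGo]
        rw [if_neg (fun h => hp h.2), if_neg hp, ih _ _ _ hnd']
        rw [Bool.not_eq_true] at hp
        simp only [List.any_cons, hp, Bool.false_or]
        split_ifs with hs
        · rfl
        · congr 1
          rw [List.filter_cons]
          have hca : (!((a :: spec rest j (a + j)).contains a)) = false := by simp
          rw [hca]
          simp only [Bool.false_eq_true, if_false]
          have hfil : List.filter (fun x => !((spec rest j (a + j)).contains x)) rest
              = List.filter (fun x => !((a :: spec rest j (a + j)).contains x)) rest := by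
            apply List.filter_congr
            intro x hx
            have hxa : x ≠ a := fun h => hna (h ▸ hx)
            simp [hxa]
          rw [hfil]
    · simp only [spec, if_neg heq]
      have haS : a ∉ spec rest j (i + j) := fun h => hna (spec_subset _ _ _ _ h)
      have hkeep : (!((spec rest j (i + j)).contains a)) = true := by simpa using haS
      simp only [funcGo]
      rw [if_neg (fun h => heq h.1)]
      by_cases hp : IsPrime ((PySem.List.pyGet? tab a).getD 0) = true
      · rw [if_pos hp, ih _ _ _ hnd']
        split_ifs with hs
        · rfl
        · rw [List.filter_cons, hkeep]
          simp [List.any_cons, hp]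
      · rw [if_neg hp, ih _ _ _ hnd']
        split_ifs with hs
        · rfl
        · rw [List.filter_cons, hkeep]
          simp only [if_true, List.any_cons]
          simp only [Bool.not_eq_true] at hp
          simp [hp]

-- ===== VERDICT (by name: the statement is the Claim_ definition above) =====
theorem func_spec : Claim_equal_func := by
  intro tab _
  unfold Spec_func func func_alt
  simp only [specGo_eq, List.nil_append]
  rw [funcGo_eq _ _ _ _ _ (PySem.List.nodup_pyRange_one 0 _)]
  simp only [Bool.false_or]
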